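-- pv_equiv track=rewrite | github.com/QureGenAI-Biotech/TyxonQ | examples-ng/vqe_parallel_pmap.py | _ps_to_xyz
-- ===== SOURCE A (Python) =====
-- def _ps_to_xyz(ps_row):
--     xyz = {"x": [], "y": [], "z": []}
--     for idx, v in enumerate(ps_row):
--         if int(v) == 1:
--             xyz["x"].append(idx)
--         elif int(v) == 2:
--             xyz["y"].append(idx)
--         elif int(v) == 3:
--             xyz["z"].append(idx)
--     return xyz
-- ===== SOURCE B (Python) =====
-- def _ps_to_xyz(ps_row):
--     return {
--         "x": [i for i, v in enumerate(ps_row) if int(v) == 1],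
--         "y": [i for i, v in enumerate(ps_row) if int(v) == 2],
--         "z": [i for i, v in enumerate(ps_row) if int(v) == 3],
--     }
-- ===== Notes on version B (the rewrite author's own statement) =====
-- stated objective: idiomatic
-- what changed: Replaced the single mutating pass that appends into a pre-built dict with a dict literal of three independent filtering comprehensions, one per Pauli value.
import Mathlib
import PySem

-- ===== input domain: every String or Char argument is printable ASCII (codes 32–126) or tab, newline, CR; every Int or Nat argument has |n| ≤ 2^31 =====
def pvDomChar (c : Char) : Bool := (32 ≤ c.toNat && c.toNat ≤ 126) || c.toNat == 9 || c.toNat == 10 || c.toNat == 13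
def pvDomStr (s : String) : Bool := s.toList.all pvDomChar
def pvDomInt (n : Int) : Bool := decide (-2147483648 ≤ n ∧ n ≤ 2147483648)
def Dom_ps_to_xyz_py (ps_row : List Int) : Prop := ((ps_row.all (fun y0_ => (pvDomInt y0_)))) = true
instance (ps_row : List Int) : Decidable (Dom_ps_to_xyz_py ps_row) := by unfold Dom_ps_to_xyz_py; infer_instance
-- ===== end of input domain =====

-- B builds the result as a dict literal of three independent filtering comprehensions
-- (one scan per Pauli value) instead of A's single mutating pass appending into a pre-built dict.

-- ===== PORT A =====
-- xyz = {"x": [], "y": [], "z": []}; for idx, v in enumerate(ps_row): append idx to the matching list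
def ps_to_xyz_py (ps_row : List Int) : List (String × List Int) :=
  ((PySem.List.enumerate ps_row).foldl
    (fun (d : PySem.Dict String (List Int)) (p : Int × Int) =>
      if p.2 == 1 then d.modify "x" [] (fun l => l ++ [p.1])
      else if p.2 == 2 then d.modify "y" [] (fun l => l ++ [p.1])
      else if p.2 == 3 then d.modify "z" [] (fun l => l ++ [p.1])
      else d)
    (((PySem.Dict.empty.insert "x" []).insert "y" []).insert "z" [])).items

-- ===== PORT B =====
def ps_to_xyz_py_alt (ps_row : List Int) : List (String × List Int) :=
  [("x", ((PySem.List.enumerate ps_row).filter (fun p => p.2 == 1)).map (·.1)),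
   ("y", ((PySem.List.enumerate ps_row).filter (fun p => p.2 == 2)).map (·.1)),
   ("z", ((PySem.List.enumerate ps_row).filter (fun p => p.2 == 3)).map (·.1))]

-- ===== PRECONDITION & SPEC =====
def Spec_ps_to_xyz_py (ps_row : List Int) (out : List (String × List Int)) : Prop := out = ps_to_xyz_py_alt ps_row
instance (ps_row : List Int) (out : List (String × List Int)) : Decidable (Spec_ps_to_xyz_py ps_row out) := by unfold Spec_ps_to_xyz_py; infer_instance

-- ===== CLAIM (what is proved, stated in full; the proofs are below) =====
def Claim_equal_ps_to_xyz_py : Prop := ∀ (ps_row : List Int), Dom_ps_to_xyz_py ps_row → Spec_ps_to_xyz_py ps_row (ps_to_xyz_py ps_row)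

-- ===== LEMMAS AND PROOFS =====

-- Loop invariant: folding A's step over any list of (index, value) pairs, starting from the
-- three-key dict with accumulated lists xs, ys, zs, appends exactly the filtered indices.
theorem ps_to_xyz_loop (l : List (Int × Int)) (xs ys zs : List Int) :
    (l.foldl
      (fun (d : PySem.Dict String (List Int)) (p : Int × Int) =>
        if p.2 == 1 then d.modify "x" [] (fun l => l ++ [p.1])
        else if p.2 == 2 then d.modify "y" [] (fun l => l ++ [p.1])
        else if p.2 == 3 then d.modify "z" [] (fun l => l ++ [p.1])
        else d)
      (PySem.Dict.mk [("x", xs), ("y", ys), ("z", zs)])).items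
    = [("x", xs ++ (l.filter (fun p => p.2 == 1)).map (·.1)),
       ("y", ys ++ (l.filter (fun p => p.2 == 2)).map (·.1)),
       ("z", zs ++ (l.filter (fun p => p.2 == 3)).map (·.1))] := by
  induction l generalizing xs ys zs with
  | nil => simp
  | cons p rest ih =>
    by_cases h1 : p.2 = 1
    · simpa [List.foldl_cons, h1, PySem.Dict.modify, PySem.Dict.insert, PySem.Dict.contains,
        PySem.Dict.get?, PySem.Dict.getD] using ih (xs ++ [p.1]) ys zs
    · by_cases h2 : p.2 = 2
      · simpa [List.foldl_cons, h1, h2, PySem.Dict.modify, PySem.Dict.insert, PySem.Dict.contains,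
          PySem.Dict.get?, PySem.Dict.getD] using ih xs (ys ++ [p.1]) zs
      · by_cases h3 : p.2 = 3
        · simpa [List.foldl_cons, h1, h2, h3, PySem.Dict.modify, PySem.Dict.insert,
            PySem.Dict.contains, PySem.Dict.get?, PySem.Dict.getD] using ih xs ys (zs ++ [p.1])
        · simpa [List.foldl_cons, h1, h2, h3] using ih xs ys zs

-- ===== VERDICT (by name: the statement is the Claim_ definition above) =====
theorem ps_to_xyz_py_spec : Claim_equal_ps_to_xyz_py := by
  intro ps_row _
  unfold Spec_ps_to_xyz_py ps_to_xyz_py ps_to_xyz_py_alt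
  have h := ps_to_xyz_loop (PySem.List.enumerate ps_row) [] [] []
  simpa using h
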